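-- pv_equiv track=rewrite | github.com/programmer-666/Cryptography | Symetric/Hill.py | textConverter
-- ===== SOURCE A (Python) =====
-- def textControl(text):
--     if len(text)%2!=0:
--         return text+'z' # changable
--     else:
--         return text
--
-- def textCutter(text):
--     return [text[2*i-2:2*i] for i in range(int(len(text)/2)+1)][1:]
--
-- def textConverter(text):
--     text = textCutter(textControl(text))
--     tmp = []
--     main = []
--     for i in text:
--         for j in range(len(i)):
--             if j < 2:
--                 tmp.append(ord(i[j])-97)
--                 if j == 1:
--                     main.append(tmp)
--                     tmp = []
--     return main
-- ===== SOURCE B (Python) =====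
-- def textConverter(text):
--     if len(text) % 2:
--         text += 'z'
--     nums = [ord(c) - 97 for c in text]
--     return [nums[i:i + 2] for i in range(0, len(nums), 2)]
-- ===== Notes on version B (the rewrite author's own statement) =====
-- stated objective: simpler
-- what changed: Replaced A's helper chain (pad helper, chunk-into-substrings helper with off-by-two slice indices, then a nested index loop with a tmp accumulator) by a flat three-step pipeline: pad, one pass converting every char to a number, one slice comprehension over range(0, n, 2) that pairs them.
import Mathlib
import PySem

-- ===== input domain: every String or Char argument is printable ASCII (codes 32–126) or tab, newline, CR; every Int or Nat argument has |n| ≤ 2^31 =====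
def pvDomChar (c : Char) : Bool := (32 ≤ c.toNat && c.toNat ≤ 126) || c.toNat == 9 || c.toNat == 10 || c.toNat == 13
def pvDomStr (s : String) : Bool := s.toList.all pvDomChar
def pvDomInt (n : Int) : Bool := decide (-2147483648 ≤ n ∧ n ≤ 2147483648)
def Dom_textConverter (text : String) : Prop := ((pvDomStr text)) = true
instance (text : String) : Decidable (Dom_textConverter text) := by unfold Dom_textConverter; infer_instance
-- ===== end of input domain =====

-- B replaces A's helper chain (pad helper, chunk-into-substrings helper, nested index
-- loop with a tmp accumulator) by a flat pipeline: pad, one pass char→number, one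
-- slice comprehension over range(0, n, 2); objective: simpler.

-- ===== PORT A =====
def textControlA (t : List Char) : List Char :=
  if t.length % 2 ≠ 0 then t ++ ['z'] else t

-- int(len(text)/2) on a nonnegative length is exact Nat division
def textCutterA (t : List Char) : List (List Char) :=
  PySem.List.slice
    ((PySem.List.pyRange 0 (((t.length / 2 : Nat) : Int) + 1) 1).map
      (fun i => PySem.List.slice t (some (2 * i - 2)) (some (2 * i))))
    (some 1) none

-- i[j] with j drawn from range(len(i)) is always in range, so the default of pyGetD is never used
def innerLoopA (st : List Int × List (List Int)) (i : List Char) :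
    List Int × List (List Int) :=
  (PySem.List.pyRange 0 ((i.length : Int)) 1).foldl
    (fun st j =>
      if j < 2 then
        let tmp := st.1 ++ [((PySem.List.pyGetD i j 'a').toNat : Int) - 97]
        if j = 1 then ([], st.2 ++ [tmp]) else (tmp, st.2)
      else st)
    st

def textConverter (text : String) : List (List Int) :=
  ((textCutterA (textControlA text.toList)).foldl innerLoopA ([], [])).2

-- ===== PORT B =====
def textConverter_alt (text : String) : List (List Int) :=
  let t := text.toList
  let t := if t.length % 2 ≠ 0 then t ++ ['z'] else t
  let nums : List Int := t.map (fun c => ((c.toNat : Int) - 97))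
  (PySem.List.pyRange 0 ((nums.length : Int)) 2).map
    (fun i => PySem.List.slice nums (some i) (some (i + 2)))

-- ===== PRECONDITION & SPEC =====
def Spec_textConverter (text : String) (out : List (List Int)) : Prop := out = textConverter_alt text
instance (text : String) (out : List (List Int)) : Decidable (Spec_textConverter text out) := by unfold Spec_textConverter; infer_instance

-- ===== CLAIM (what is proved, stated in full; the proofs are below) =====
def Claim_equal_textConverter : Prop := ∀ (text : String), Dom_textConverter text → Spec_textConverter text (textConverter text)

-- ===== LEMMAS AND PROOFS =====

-- A's textCutter produces exactly the 2-wide windows at even offsets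
theorem textCutterA_eq (t : List Char) :
    textCutterA t = (List.range (t.length / 2)).map (fun k => (t.drop (2*k)).take 2) := by
  unfold textCutterA
  rw [PySem.List.slice_from_one, PySem.List.pyRange_one]
  have h1 : (((((t.length / 2 : Nat) : Int)) + 1 - 0).toNat) = t.length / 2 + 1 := by omega
  rw [h1, List.map_map, List.range_succ_eq_map, List.map_cons, List.tail_cons, List.map_map]
  apply List.map_congr_left
  intro k hk
  simp only [Function.comp]
  have e1 : (2 * ((0:Int) + (↑(Nat.succ k))) - 2) = ((2*k : Nat) : Int) := by push_cast; ring
  have e2 : (2 * ((0:Int) + (↑(Nat.succ k)))) = ((2*k+2 : Nat) : Int) := by push_cast; ring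
  rw [e1, e2, PySem.List.slice_natCast]
  congr 1
  omega

-- A's nested loop over chunks that are all pairs appends one converted pair per chunk
theorem fold_len2 (cs : List (List Char))
    (h : ∀ c ∈ cs, ∃ a b, c = [a, b]) (acc : List (List Int)) :
    cs.foldl innerLoopA ([], acc) =
      ([], acc ++ cs.map (fun c => c.map (fun ch => ((ch.toNat : Int) - 97)))) := by
  induction cs generalizing acc with
  | nil => simp
  | cons c cs ih =>
    obtain ⟨a, b, rfl⟩ := h c (by simp)
    have hstep : innerLoopA ([], acc) [a, b]
        = ([], acc ++ [[((a.toNat : Int) - 97), ((b.toNat : Int) - 97)]]) := by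
      simp only [innerLoopA]
      have hl : (([a,b] : List Char).length : Int) = 2 := by simp
      rw [hl, show PySem.List.pyRange 0 2 1 = [0,1] from by decide]
      simp [PySem.List.pyGetD]
    rw [List.foldl_cons, hstep, ih (fun c hc => h c (by simp [hc]))]
    simp

theorem control_even (t : List Char) : (textControlA t).length % 2 = 0 := by
  unfold textControlA; split_ifs with h
  · simp; omega
  · omega

-- B is the same 2-wide windows, converted pointwise
theorem alt_eq (text : String) :
    textConverter_alt text =
      (List.range ((textControlA text.toList).length / 2)).map
        (fun k => (((textControlA text.toList).drop (2*k)).take 2).map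
          (fun ch => ((ch.toNat : Int) - 97))) := by
  have hev := control_even text.toList
  unfold textConverter_alt
  show (PySem.List.pyRange 0 _ 2).map _ = _
  set p := textControlA text.toList with hp
  have hpd : (if text.toList.length % 2 ≠ 0 then text.toList ++ ['z'] else text.toList) = p := rfl
  rw [hpd]
  have hlen : (p.map (fun c => ((c.toNat : Int) - 97))).length = p.length := by simp
  rw [hlen]
  rw [PySem.List.pyRange_of_pos 0 (p.length : Int) (by norm_num)]
  have hc : (if (0:Int) < (p.length : Int) then (((p.length : Int) - 0 + 2 - 1) / 2).toNat else 0)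
      = p.length / 2 := by split_ifs with h <;> omega
  rw [hc, List.map_map]
  apply List.map_congr_left
  intro k hk
  simp only [Function.comp]
  have e1 : ((0:Int) + 2 * ↑k) = ((2*k : Nat) : Int) := by push_cast; ring
  have e2 : ((0:Int) + 2 * ↑k + 2) = ((2*k+2 : Nat) : Int) := by push_cast; ring
  rw [e2, e1, PySem.List.slice_natCast]
  rw [← List.map_drop, ← List.map_take]
  norm_num

theorem exists_pair (l : List Char) (h : l.length = 2) : ∃ a b, l = [a, b] := by
  rcases l with _ | ⟨a, _ | ⟨b, _ | _⟩⟩ <;> simp_all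

-- ===== VERDICT (by name: the statement is the Claim_ definition above) =====
theorem textConverter_spec : Claim_equal_textConverter := by
  intro text _
  unfold Spec_textConverter textConverter
  rw [textCutterA_eq]
  set p := textControlA text.toList with hp
  have hev := control_even text.toList
  have hshape : ∀ c ∈ (List.range (p.length / 2)).map (fun k => (p.drop (2*k)).take 2),
      ∃ a b, c = [a, b] := by
    intro c hc
    simp only [List.mem_map, List.mem_range] at hc
    obtain ⟨k, hk, rfl⟩ := hc
    apply exists_pair
    rw [hp] at hk ⊢
    simp only [List.length_take, List.length_drop]
    omega
  rw [fold_len2 _ hshape []]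
  rw [alt_eq, List.map_map]
  simp only [← hp]
  simp [Function.comp, List.map_take, List.map_drop]
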